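-- pv_equiv track=rewrite | github.com/UCLA-Security-and-Privacy-Lab/Cosmic | WebformExtraction/webarena/pipeline_integration/scripts/textbox_fields_extraction.py | count_static_text_after_last_input
-- ===== SOURCE A (Python) =====
-- def count_static_text_after_last_input(elements):
--     # Find the position of the last input element
--     last_input_index = -1
--     for i, element in enumerate(elements):
--         if element.get("type") == "text" and element.get("tag") == "input":
--             last_input_index = i
--
--     # Count static_text elements after the last input element
--     count = 0
--     if last_input_index != -1:
--         for element in elements[last_input_index + 1:]:
--             if element.get("type") == "static_text":
--                 count += 1
--
--     return count
-- ===== SOURCE B (Python) =====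
-- def count_static_text_after_last_input(elements):
--     # One backward pass: count static_text until the first text input seen
--     # from the end (i.e. the last one overall); 0 if no input exists.
--     count = 0
--     for element in reversed(elements):
--         if element.get("type") == "text" and element.get("tag") == "input":
--             return count
--         if element.get("type") == "static_text":
--             count += 1
--     return 0
-- ===== Notes on version B (the rewrite author's own statement) =====
-- stated objective: alternative
-- what changed: Replaces A's two forward passes (find last input index, then slice and count) with a single backward scan that counts static_text and stops at the first input seen from the end.
import Mathlib
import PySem

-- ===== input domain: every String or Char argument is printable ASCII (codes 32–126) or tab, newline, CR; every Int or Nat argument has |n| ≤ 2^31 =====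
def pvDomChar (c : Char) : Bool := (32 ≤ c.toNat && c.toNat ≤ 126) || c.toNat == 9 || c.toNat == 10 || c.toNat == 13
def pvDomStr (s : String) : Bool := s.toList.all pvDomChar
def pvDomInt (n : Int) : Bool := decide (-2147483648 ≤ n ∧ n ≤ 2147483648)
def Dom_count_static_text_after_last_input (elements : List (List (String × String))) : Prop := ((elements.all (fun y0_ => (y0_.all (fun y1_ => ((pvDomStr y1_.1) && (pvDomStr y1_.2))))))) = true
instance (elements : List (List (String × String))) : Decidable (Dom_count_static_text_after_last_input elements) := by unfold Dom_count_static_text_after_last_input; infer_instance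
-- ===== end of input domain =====

-- B changes the decomposition only: one backward scan instead of A's two forward passes; same O(n) cost.

-- element.get(k) on the association-list encoding of a Python dict
def pvElemGet (e : List (String × String)) (k : String) : Option String :=
  (PySem.Dict.ofList e).get? k

-- ===== PORT A =====
def count_static_text_after_last_input (elements : List (List (String × String))) : Int :=
  -- for i, element in enumerate(elements): if …: last_input_index = i
  let last_input_index : Int :=
    (PySem.List.enumerate elements).foldl
      (fun acc p =>
        if pvElemGet p.2 "type" == some "text" && pvElemGet p.2 "tag" == some "input"
        then p.1 else acc) (-1)
  -- count = 0; if last_input_index != -1: for element in elements[last_input_index+1:] …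
  if last_input_index ≠ -1 then
    (PySem.List.slice elements (some (last_input_index + 1)) none).foldl
      (fun count e => if pvElemGet e "type" == some "static_text" then count + 1 else count) 0
  else 0

-- ===== PORT B =====
-- the reversed-loop body of Source B: return count on the first input seen, else accumulate
def pvBackScan (l : List (List (String × String))) (count : Int) : Int :=
  match l with
  | [] => 0
  | e :: t =>
    if pvElemGet e "type" == some "text" && pvElemGet e "tag" == some "input" then count
    else pvBackScan t (count + if pvElemGet e "type" == some "static_text" then 1 else 0)

def count_static_text_after_last_input_alt (elements : List (List (String × String))) : Int :=
  pvBackScan elements.reverse 0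

-- ===== PRECONDITION & SPEC =====
def Spec_count_static_text_after_last_input (elements : List (List (String × String))) (out : Int) : Prop := out = count_static_text_after_last_input_alt elements
instance (elements : List (List (String × String))) (out : Int) : Decidable (Spec_count_static_text_after_last_input elements out) := by unfold Spec_count_static_text_after_last_input; infer_instance

-- ===== CLAIM (what is proved, stated in full; the proofs are below) =====
def Claim_equal_count_static_text_after_last_input : Prop := ∀ (elements : List (List (String × String))), Dom_count_static_text_after_last_input elements → Spec_count_static_text_after_last_input elements (count_static_text_after_last_input elements)

-- ===== LEMMAS AND PROOFS =====

def pvIsInput (e : List (String × String)) : Bool :=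
  pvElemGet e "type" == some "text" && pvElemGet e "tag" == some "input"

def pvStatic (e : List (String × String)) : Int :=
  if pvElemGet e "type" == some "static_text" then 1 else 0

-- A's first loop, abstractly
def pvLastIdx (l : List (List (String × String))) : Int :=
  (PySem.List.enumerate l).foldl (fun acc p => if pvIsInput p.2 then p.1 else acc) (-1)

theorem pvLastIdx_append (l : List (List (String × String))) (e : List (String × String)) :
    pvLastIdx (l ++ [e]) = if pvIsInput e then (l.length : Int) else pvLastIdx l := by
  simp [pvLastIdx, PySem.List.enumerate_append, PySem.List.enumerate]

theorem pvLastIdx_range (l : List (List (String × String))) :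
    pvLastIdx l = -1 ∨ ∃ i : Nat, i < l.length ∧ pvLastIdx l = (i : Int) := by
  induction l using List.reverseRecOn with
  | nil => left; rfl
  | append_singleton l e ih =>
    rw [pvLastIdx_append]
    by_cases h : pvIsInput e
    · right; exact ⟨l.length, by simp [h]⟩
    · simp only [h, Bool.false_eq_true, if_false]
      rcases ih with h1 | ⟨i, hi, he⟩
      · left; exact h1
      · right; exact ⟨i, by simp; omega, he⟩

theorem pvLastIdx_neg_iff (l : List (List (String × String))) :
    pvLastIdx l = -1 ↔ l.any pvIsInput = false := by
  induction l using List.reverseRecOn with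
  | nil => simp [pvLastIdx, PySem.List.enumerate]
  | append_singleton l e ih =>
    rw [pvLastIdx_append]
    by_cases h : pvIsInput e
    · simp [h]
    · simp [h, ih]

theorem pvBackScan_shift (l : List (List (String × String))) (c : Int) :
    pvBackScan l c = pvBackScan l 0 + (if (l.any pvIsInput) then c else 0) := by
  induction l generalizing c with
  | nil => simp [pvBackScan]
  | cons e t ih =>
    simp only [pvBackScan, List.any_cons, pvIsInput]
    by_cases h : (pvElemGet e "type" == some "text" && pvElemGet e "tag" == some "input") = true
    · simp [h]
    · simp only [h, Bool.false_eq_true, if_false, Bool.false_or]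
      rw [ih, ih (0 + _)]
      by_cases h2 : t.any pvIsInput
      · simp [h2]; ring
      · simp [h2]

-- the simple count A's second loop computes
def pvCnt (l : List (List (String × String))) : Int := (l.map pvStatic).sum

theorem pvSecondLoop (l : List (List (String × String))) :
    l.foldl (fun count e => if pvElemGet e "type" == some "static_text" then count + 1 else count) 0
      = pvCnt l := by
  have h := PySem.List.foldl_add (l := l) (a := (0 : Int)) (g := pvStatic)
  rw [zero_add] at h
  have hfun : (fun (count : Int) e =>
      if pvElemGet e "type" == some "static_text" then count + 1 else count)
      = (fun (acc : Int) x => acc + pvStatic x) := by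
    funext acc e; simp only [pvStatic]; split <;> ring
  rw [pvCnt, hfun, h]

-- main characterisation: the backward scan computes A's answer
theorem pvMain (l : List (List (String × String))) :
    pvBackScan l.reverse 0 =
      if pvLastIdx l ≠ -1 then pvCnt (l.drop ((pvLastIdx l).toNat + 1)) else 0 := by
  induction l using List.reverseRecOn with
  | nil => simp [pvBackScan, pvLastIdx, PySem.List.enumerate]
  | append_singleton l e ih =>
    rw [List.reverse_append, pvLastIdx_append]
    by_cases h : pvIsInput e
    · simp only [h, if_pos, List.reverse_singleton, List.singleton_append, pvBackScan]
      have hb : (pvElemGet e "type" == some "text" && pvElemGet e "tag" == some "input") = true := h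
      rw [if_pos hb]
      have hlen : ((l.length : Int) ≠ -1) := by omega
      simp [hlen, pvCnt, List.drop_eq_nil_of_le]
    · have hb : ¬ (pvElemGet e "type" == some "text" && pvElemGet e "tag" == some "input") = true := h
      simp only [h, Bool.false_eq_true, if_false, List.reverse_singleton, List.singleton_append,
        pvBackScan, hb, zero_add]
      rw [pvBackScan_shift, ih]
      have hany : l.reverse.any pvIsInput = l.any pvIsInput := List.any_reverse ..
      by_cases hne : pvLastIdx l = -1
      · have hnone : l.any pvIsInput = false := (pvLastIdx_neg_iff l).mp hne
        simp [hne, hany, hnone]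
      · have hsome : l.any pvIsInput = true := by
          by_contra hc
          exact hne ((pvLastIdx_neg_iff l).mpr (Bool.of_not_eq_true hc))
        rcases pvLastIdx_range l with h1 | ⟨i, hi, he⟩
        · exact absurd h1 hne
        · rw [he] at *
          have hne' : ((i : Int) ≠ -1) := by omega
          have hdrop : (l ++ [e]).drop (i + 1) = l.drop (i + 1) ++ [e] :=
            List.drop_append_of_le_length (by omega)
          simp only [hne', ne_eq, not_false_iff, if_pos, hany, hsome,
            Int.toNat_natCast, hdrop]
          simp [pvCnt, pvStatic]

theorem pvSlice_eq_drop (l : List (List (String × String))) (i : Nat) :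
    PySem.List.slice l (some ((i : Int) + 1)) none = l.drop (i + 1) := by
  have h : ((i : Int) + 1) = ((i + 1 : Nat) : Int) := by push_cast; ring
  rw [h, PySem.List.slice_from_natCast]

-- ===== VERDICT (by name: the statement is the Claim_ definition above) =====
theorem count_static_text_after_last_input_spec : Claim_equal_count_static_text_after_last_input := by
  intro elements _
  unfold Spec_count_static_text_after_last_input
  unfold count_static_text_after_last_input count_static_text_after_last_input_alt
  show (if pvLastIdx elements ≠ -1 then
      (PySem.List.slice elements (some (pvLastIdx elements + 1)) none).foldl
        (fun count e => if pvElemGet e "type" == some "static_text" then count + 1 else count) 0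
    else 0) = pvBackScan elements.reverse 0
  rw [pvMain]
  by_cases hne : pvLastIdx elements = -1
  · simp [hne]
  · rcases pvLastIdx_range elements with h1 | ⟨i, hi, he⟩
    · exact absurd h1 hne
    · rw [he] at *
      have hne' : ((i : Int) ≠ -1) := by omega
      rw [if_pos hne', if_pos hne', pvSlice_eq_drop, pvSecondLoop, Int.toNat_natCast]
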